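-- pv_equiv track=rewrite | github.com/shemshallah/qtcl-blockchain | mempool.py | halving_reward
-- ===== SOURCE A (Python) =====
-- def halving_reward(block_height: int) -> int:
--     """
--     QTCL halving schedule:
--         Epoch 0  (0 – 26623)    : 2000 base = 20 QTCL
--         Epoch 1  (26624–53247)  : 1000 base = 10 QTCL
--         Epoch 2  (53248–79871)  :  500 base =  5 QTCL
--         Epoch 3  (79872–106495) :  250 base =  2.5 QTCL
--         Beyond               :  125 base =  1.25 QTCL (permanent minimum)
--     """
--     EPOCHS = [
--         (0,      26_623, 2_000),
--         (26_624, 53_247, 1_000),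
--         (53_248, 79_871,   500),
--         (79_872, 106_495,  250),
--     ]
--     for start, end, reward in EPOCHS:
--         if start <= block_height <= end:
--             return reward
--     return 125
-- ===== SOURCE B (Python) =====
-- def halving_reward(block_height: int) -> int:
--     epoch = block_height // 26624
--     if 0 <= epoch <= 3:
--         return 2000 >> epoch
--     return 125
-- ===== Notes on version B (the rewrite author's own statement) =====
-- stated objective: simpler
-- what changed: Replaced the linear scan over the 4-entry EPOCHS table with a single floor-division to get the epoch index and a bit-shift 2000 >> epoch, clamped to 125 outside epochs 0..3.
import Mathlib
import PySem

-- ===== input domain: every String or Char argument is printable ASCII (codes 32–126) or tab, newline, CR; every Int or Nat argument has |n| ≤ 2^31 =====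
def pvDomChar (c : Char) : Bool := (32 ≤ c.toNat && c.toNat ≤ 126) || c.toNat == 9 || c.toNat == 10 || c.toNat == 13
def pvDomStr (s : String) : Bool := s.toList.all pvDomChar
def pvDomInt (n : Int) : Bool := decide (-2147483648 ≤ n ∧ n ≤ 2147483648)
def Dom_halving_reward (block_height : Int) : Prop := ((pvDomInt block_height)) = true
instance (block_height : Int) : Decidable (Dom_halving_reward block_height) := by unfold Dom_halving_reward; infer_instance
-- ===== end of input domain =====

-- B replaces A's table scan by one floor-division and a bit-shift (objective: simpler).

-- ===== PORT A =====
-- loop 'for start, end, reward in EPOCHS: if start <= h <= end: return reward' / 'return 125'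
def halvingEpochLoop (block_height : Int) : List (Int × Int × Int) → Int
  | [] => 125
  | (s, e, r) :: rest =>
      if s ≤ block_height ∧ block_height ≤ e then r else halvingEpochLoop block_height rest

def halving_reward (block_height : Int) : Int :=
  halvingEpochLoop block_height
    [(0, 26623, 2000), (26624, 53247, 1000), (53248, 79871, 500), (79872, 106495, 250)]

-- ===== PORT B =====
def halving_reward_alt (block_height : Int) : Int :=
  let epoch := PySem.Int.floordiv block_height 26624
  if 0 ≤ epoch ∧ epoch ≤ 3 then (2000 : Int) >>> epoch.toNat else 125

-- ===== PRECONDITION & SPEC =====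
def Spec_halving_reward (block_height : Int) (out : Int) : Prop := out = halving_reward_alt block_height
instance (block_height : Int) (out : Int) : Decidable (Spec_halving_reward block_height out) := by unfold Spec_halving_reward; infer_instance

-- ===== CLAIM (what is proved, stated in full; the proofs are below) =====
def Claim_equal_halving_reward : Prop := ∀ (block_height : Int), Dom_halving_reward block_height → Spec_halving_reward block_height (halving_reward block_height)

-- ===== LEMMAS AND PROOFS =====
theorem halving_epoch_bracket (h q : Int) (hq : PySem.Int.floordiv h 26624 = q) :
    q * 26624 ≤ h ∧ h < (q + 1) * 26624 :=
  (PySem.Int.floordiv_eq_iff_of_pos (by norm_num)).1 hq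

-- ===== VERDICT (by name: the statement is the Claim_ definition above) =====
theorem halving_reward_spec : Claim_equal_halving_reward := by
  intro h _
  unfold Spec_halving_reward halving_reward halving_reward_alt
  simp only [halvingEpochLoop]
  generalize hq : PySem.Int.floordiv h 26624 = q
  obtain ⟨hl, hr⟩ := halving_epoch_bracket h q hq
  by_cases h0 : q = 0
  · subst h0
    have hs : ((2000 : Int) >>> ((0 : Int)).toNat) = 2000 := by decide
    simp only [hs]; split_ifs <;> omega
  · by_cases h1 : q = 1
    · subst h1
      have hs : ((2000 : Int) >>> ((1 : Int)).toNat) = 1000 := by decide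
      simp only [hs]; split_ifs <;> omega
    · by_cases h2 : q = 2
      · subst h2
        have hs : ((2000 : Int) >>> ((2 : Int)).toNat) = 500 := by decide
        simp only [hs]; split_ifs <;> omega
      · by_cases h3 : q = 3
        · subst h3
          have hs : ((2000 : Int) >>> ((3 : Int)).toNat) = 250 := by decide
          simp only [hs]; split_ifs <;> omega
        · have hq' : ¬ (0 ≤ q ∧ q ≤ 3) := by omega
          have : q ≤ -1 ∨ 4 ≤ q := by omega
          simp only [hq', if_false]
          rcases this with hc | hc <;> split_ifs <;> first | rfl | nlinarith
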